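-- pv_equiv track=rewrite | github.com/leotrubach/aocsolutions | python/day08/solution.py | view_range
-- ===== SOURCE A (Python) =====
-- def view_range(row: list[int]):
--     result = []
--     for i, v in enumerate(row):
--         visible_to_right = 0
--         for j in range(i+1, len(row)):
--             visible_to_right += 1
--             if row[j] >= v:
--                 break
--         result.append(visible_to_right)
--     return result
-- ===== SOURCE B (Python) =====
-- def view_range(row: list[int]):
--     # Monotonic stack: scan right-to-left; stack holds indices with
--     # non-decreasing heights from top, so the top after popping all
--     # strictly smaller heights is the nearest tree >= row[i] to the right.
--     n = len(row)
--     res = []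
--     stack = []  # indices, top at end
--     for i in range(n - 1, -1, -1):
--         v = row[i]
--         while stack and row[stack[-1]] < v:
--             stack.pop()
--         res.append((stack[-1] - i) if stack else (n - 1 - i))
--         stack.append(i)
--     res.reverse()
--     return res
-- ===== Notes on version B (the rewrite author's own statement) =====
-- stated objective: faster
-- what changed: Replaced the per-index inner rightward scan by a single right-to-left pass with a monotonic stack of indices (nearest element >= to the right), so each index is pushed and popped at most once.
import Mathlib
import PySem

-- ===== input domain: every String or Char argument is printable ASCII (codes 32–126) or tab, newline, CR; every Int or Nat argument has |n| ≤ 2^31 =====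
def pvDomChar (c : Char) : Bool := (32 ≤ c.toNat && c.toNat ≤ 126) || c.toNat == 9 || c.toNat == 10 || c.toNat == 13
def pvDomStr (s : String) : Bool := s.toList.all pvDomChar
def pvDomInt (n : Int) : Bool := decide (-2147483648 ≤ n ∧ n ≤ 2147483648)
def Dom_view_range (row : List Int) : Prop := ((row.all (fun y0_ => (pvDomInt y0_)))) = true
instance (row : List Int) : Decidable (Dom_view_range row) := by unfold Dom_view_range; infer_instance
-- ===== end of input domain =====

-- B replaces A's per-index rightward scan by one right-to-left pass with a monotonic stack
-- of indices (nearest element ≥ to the right); objective: faster.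

-- ===== PORT A =====
-- inner loop: for j in range(i+1, len(row)): visible += 1; if row[j] >= v: break
def viewLoopA (row : List Int) (v : Int) : List Int → Int → Int
  | [], vis => vis
  | j :: js, vis =>
    let vis' := vis + 1
    if PySem.List.pyGetD row j 0 ≥ v then vis' else viewLoopA row v js vis'
def view_range (row : List Int) : List Int :=
  (PySem.List.enumerate row 0).foldl
    (fun result iv =>
      result ++ [viewLoopA row iv.2 (PySem.List.pyRange (iv.1 + 1) (row.length : Int) 1) 0]) []

-- ===== PORT B =====
-- while stack and row[stack[-1]] < v: stack.pop()   (stack top at the HEAD here)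
-- for i in range(n-1, -1, -1): …; res is built by prepending (= Python's append + final reverse)
def bPop (row : List Int) (v : Int) : List Nat → List Nat
  | [] => []
  | j :: js => if row.getD j 0 < v then bPop row v js else j :: js
def bLoop (row : List Int) (n : Nat) : Nat → List Nat → List Int → List Int
  | 0, _, res => res
  | k + 1, stack, res =>
    let i := k
    let v := row.getD i 0
    let stack' := bPop row v stack
    let d : Int :=
      match stack' with
      | [] => (n : Int) - 1 - (i : Int)
      | j :: _ => (j : Int) - (i : Int)
    bLoop row n k (i :: stack') (d :: res)
def view_range_alt (row : List Int) : List Int := bLoop row row.length row.length [] []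

-- ===== PRECONDITION & SPEC =====
def Spec_view_range (row : List Int) (out : List Int) : Prop := out = view_range_alt row
instance (row : List Int) (out : List Int) : Decidable (Spec_view_range row out) := by unfold Spec_view_range; infer_instance

-- ===== CLAIM (what is proved, stated in full; the proofs are below) =====
def Claim_equal_view_range : Prop := ∀ (row : List Int), Dom_view_range row → Spec_view_range row (view_range row)

-- ===== LEMMAS AND PROOFS =====

-- common specification: the viewing distance of a tree of height v over the suffix t to its right
def dfun (v : Int) : List Int → Int
  | [] => 0
  | h :: t => if v ≤ h then 1 else dfun v t + 1
def specList (row : List Int) : List Int :=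
  (List.range row.length).map (fun i => dfun (row.getD i 0) (row.drop (i + 1)))

-- the monotonic stack contents after processing indices n-m..n-1 (top at head)
def stairs (row : List Int) (n : Nat) : Nat → List Nat
  | 0 => []
  | m + 1 =>
    (n - (m + 1)) :: (stairs row n m).filter (fun j => decide (row.getD (n - (m + 1)) 0 ≤ row.getD j 0))

theorem stairs_bounds (row : List Int) (n : Nat) :
    ∀ m, m ≤ n → ∀ j ∈ stairs row n m, n - m ≤ j ∧ j < n := by
  intro m
  induction m with
  | zero => intro _ j hj; simp [stairs] at hj
  | succ m ih =>
    intro hm j hj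
    simp only [stairs, List.mem_cons, List.mem_filter] at hj
    rcases hj with rfl | ⟨hj, _⟩
    · omega
    · have := ih (by omega) j hj; omega

theorem stairs_sorted (row : List Int) (n : Nat) :
    ∀ m, m ≤ n → (stairs row n m).Pairwise (· < ·) := by
  intro m
  induction m with
  | zero => intro _; simp [stairs]
  | succ m ih =>
    intro hm
    simp only [stairs]
    refine List.Pairwise.cons ?_ (List.Pairwise.filter _ (ih (by omega)))
    intro j hj
    have := stairs_bounds row n m (by omega) j (List.mem_of_mem_filter hj)
    omega

theorem stairs_val_sorted (row : List Int) (n : Nat) :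
    ∀ m, m ≤ n → (stairs row n m).Pairwise (fun a b => row.getD a 0 ≤ row.getD b 0) := by
  intro m
  induction m with
  | zero => intro _; simp [stairs]
  | succ m ih =>
    intro hm
    simp only [stairs]
    refine List.Pairwise.cons ?_ (List.Pairwise.filter _ (ih (by omega)))
    intro j hj
    rcases List.mem_filter.mp hj with ⟨_, hp⟩
    exact of_decide_eq_true hp

theorem stairs_complete (row : List Int) (n : Nat) :
    ∀ m, m ≤ n → ∀ j, n - m ≤ j → j < n →
      (∀ k, n - m ≤ k → k < j → row.getD k 0 ≤ row.getD j 0) → j ∈ stairs row n m := by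
  intro m
  induction m with
  | zero => intro _ j h1 h2 _; omega
  | succ m ih =>
    intro hm j h1 h2 hdom
    simp only [stairs, List.mem_cons, List.mem_filter]
    by_cases hj : j = n - (m + 1)
    · exact Or.inl hj
    · refine Or.inr ⟨ih (by omega) j (by omega) h2 (fun k hk1 hk2 => hdom k (by omega) hk2), ?_⟩
      exact decide_eq_true (hdom (n - (m + 1)) (by omega) (by omega))

theorem bPop_eq_filter (row : List Int) (v : Int) :
    ∀ l : List Nat, l.Pairwise (fun a b => row.getD a 0 ≤ row.getD b 0) →
      bPop row v l = l.filter (fun j => decide (v ≤ row.getD j 0)) := by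
  intro l
  induction l with
  | nil => intro _; rfl
  | cons j js ih =>
    intro hpw
    rcases List.pairwise_cons.mp hpw with ⟨hj, htl⟩
    by_cases h : row.getD j 0 < v
    · simp only [bPop, if_pos h, List.filter_cons,
        decide_eq_false (by omega : ¬ v ≤ row.getD j 0)]
      exact ih htl
    · simp only [bPop, if_neg h, List.filter_cons, decide_eq_true (by omega : v ≤ row.getD j 0)]
      simp only [if_true]
      congr 1
      exact (List.filter_eq_self.mpr (fun b hb => decide_eq_true (le_trans (by omega) (hj b hb)))).symm

theorem filter_head {p : Nat → Bool} :
    ∀ (l : List Nat), l.Pairwise (· < ·) → ∀ j0 ∈ l, p j0 = true →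
      (∀ x ∈ l, x < j0 → p x = false) → ∃ t, l.filter p = j0 :: t := by
  intro l
  induction l with
  | nil => intro _ j0 hj; simp at hj
  | cons a t ih =>
    intro hpw j0 hmem hp hlt
    rcases List.pairwise_cons.mp hpw with ⟨ha, htl⟩
    rcases List.mem_cons.mp hmem with rfl | hmt
    · exact ⟨t.filter p, by simp [hp]⟩
    · have halt : a < j0 := ha j0 hmt
      have hpa : p a = false := hlt a List.mem_cons_self halt
      rw [List.filter_cons, hpa]
      exact ih htl j0 hmt hp (fun x hx => hlt x (List.mem_cons_of_mem a hx))

theorem dfun_all_lt (v : Int) : ∀ t : List Int, (∀ x ∈ t, x < v) → dfun v t = t.length := by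
  intro t
  induction t with
  | nil => intro _; rfl
  | cons h tl ih =>
    intro hall
    have := hall h List.mem_cons_self
    simp only [dfun, if_neg (by omega : ¬ v ≤ h), List.length_cons,
      ih (fun x hx => hall x (List.mem_cons_of_mem h hx))]
    push_cast; ring

theorem dfun_least (v : Int) :
    ∀ (t : List Int) (k0 : Nat) (h : k0 < t.length), v ≤ t[k0] →
      (∀ k (hk : k < k0), t[k]'(by omega) < v) → dfun v t = (k0 : Int) + 1 := by
  intro t
  induction t with
  | nil => intro k0 h; simp at h
  | cons a tl ih =>
    intro k0 h hge hlt
    cases k0 with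
    | zero => simp only [List.getElem_cons_zero] at hge; simp [dfun, hge]
    | succ k' =>
      have ha : a < v := hlt 0 (by omega)
      simp only [dfun, if_neg (by omega : ¬ v ≤ a)]
      rw [ih k' (by simpa using h) (by simpa using hge)
        (fun k hk => by simpa using hlt (k + 1) (by omega))]
      push_cast; ring

theorem getD_eq_getElem' (row : List Int) (j : Nat) (hj : j < row.length) :
    row.getD j 0 = row[j] := by
  rw [List.getD_eq_getElem?_getD, List.getElem?_eq_getElem hj]; rfl

theorem stairs_succ_of_lt (row : List Int) (n k : Nat) (h : k < n) :
    stairs row n (n - k) =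
      k :: (stairs row n (n - (k + 1))).filter (fun j => decide (row.getD k 0 ≤ row.getD j 0)) := by
  have h1 : n - k = (n - (k + 1)) + 1 := by omega
  have h2 : n - ((n - (k + 1)) + 1) = k := by omega
  rw [h1]; simp only [stairs, h2]

theorem bLoop_eq (row : List Int) :
    ∀ k, k ≤ row.length → ∀ res,
      bLoop row row.length k (stairs row row.length (row.length - k)) res
        = (specList row).take k ++ res := by
  intro k
  induction k with
  | zero => intro _ res; simp [bLoop]
  | succ k ih =>
    intro hk res
    set n := row.length with hn
    have hkn : k < n := by omega
    set v := row.getD k 0 with hv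
    -- the stack entering this iteration
    have hstack := stairs_succ_of_lt row n k hkn
    have hval := stairs_val_sorted row n (n - (k + 1)) (by omega)
    have hsorted := stairs_sorted row n (n - (k + 1)) (by omega)
    have hpop : bPop row v (stairs row n (n - (k + 1)))
        = (stairs row n (n - (k + 1))).filter (fun j => decide (v ≤ row.getD j 0)) :=
      bPop_eq_filter row v _ hval
    -- d equals the spec value at index k
    have hd : (match (stairs row n (n - (k + 1))).filter (fun j => decide (v ≤ row.getD j 0)) with
        | [] => (n : Int) - 1 - (k : Int)
        | j :: _ => (j : Int) - (k : Int)) = dfun (row.getD k 0) (row.drop (k + 1)) := by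
      rw [← hv]
      have hmS : ∀ j ∈ stairs row n (n - (k + 1)), k + 1 ≤ j ∧ j < n := by
        intro j hj
        have := stairs_bounds row n (n - (k + 1)) (by omega) j hj
        omega
      have hdroplen : (row.drop (k + 1)).length = n - (k + 1) := by
        simp [List.length_drop, hn]
      by_cases hex : ∃ j, (k + 1 ≤ j ∧ j < n) ∧ v ≤ row.getD j 0
      · obtain ⟨j0, hj0, hmin⟩ :
            ∃ j0, ((k + 1 ≤ j0 ∧ j0 < n) ∧ v ≤ row.getD j0 0) ∧
              ∀ m, m < j0 → ¬((k + 1 ≤ m ∧ m < n) ∧ v ≤ row.getD m 0) :=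
          ⟨Nat.find hex, Nat.find_spec hex, fun m hm => Nat.find_min hex hm⟩
        have hlt' : ∀ x, k + 1 ≤ x → x < j0 → row.getD x 0 < v := by
          intro x hx1 hx2
          by_contra hcon
          exact hmin x hx2 ⟨⟨hx1, by omega⟩, by omega⟩
        have hj0mem : j0 ∈ stairs row n (n - (k + 1)) := by
          apply stairs_complete row n (n - (k + 1)) (by omega) j0 (by omega) hj0.1.2
          intro kk h1 h2
          have h3 := hlt' kk (by omega) h2
          have h4 := hj0.2
          omega
        obtain ⟨t, hft⟩ := filter_head (p := fun j => decide (v ≤ row.getD j 0)) (stairs row n (n - (k + 1))) hsorted j0 hj0mem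
          (decide_eq_true hj0.2)
          (fun x hx hxlt => decide_eq_false (by
            have hb := hmS x hx
            have := hlt' x hb.1 hxlt
            omega))
        rw [hft]
        show (j0 : Int) - (k : Int) = dfun v (row.drop (k + 1))
        have hlen2 : j0 - (k + 1) < (row.drop (k + 1)).length := by omega
        have hge : v ≤ (row.drop (k + 1))[j0 - (k + 1)] := by
          rw [List.getElem_drop]
          have hidx : k + 1 + (j0 - (k + 1)) = j0 := by omega
          simp only [hidx]
          rw [← getD_eq_getElem' row j0 (by omega)]
          exact hj0.2
        have hltk : ∀ kk (hk2 : kk < j0 - (k + 1)), (row.drop (k + 1))[kk]'(by omega) < v := by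
          intro kk hk2
          rw [List.getElem_drop]
          rw [← getD_eq_getElem' row (k + 1 + kk) (by omega)]
          exact hlt' (k + 1 + kk) (by omega) (by omega)
        rw [dfun_least v (row.drop (k + 1)) (j0 - (k + 1)) hlen2 hge hltk]
        have : k + 1 ≤ j0 := hj0.1.1
        omega
      · have hfe : (stairs row n (n - (k + 1))).filter (fun j => decide (v ≤ row.getD j 0)) = [] := by
          apply List.filter_eq_nil_iff.mpr
          intro j hj
          have hb := hmS j hj
          simp only [decide_eq_true_eq]
          intro hcon
          exact hex ⟨j, hb, hcon⟩
        rw [hfe]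
        show (n : Int) - 1 - (k : Int) = dfun v (row.drop (k + 1))
        rw [dfun_all_lt v (row.drop (k + 1)) ?_]
        · rw [hdroplen]; omega
        · intro x hx
          obtain ⟨kk, hkk, rfl⟩ := List.mem_iff_getElem.mp hx
          rw [List.getElem_drop]
          rw [← getD_eq_getElem' row (k + 1 + kk) (by omega)]
          by_contra hcon
          exact hex ⟨k + 1 + kk, ⟨by omega, by omega⟩, by omega⟩
    -- one unfolding of bLoop
    have hstep : bLoop row n (k + 1) (stairs row n (n - (k + 1))) res
        = bLoop row n k (stairs row n (n - k))
            ((dfun (row.getD k 0) (row.drop (k + 1))) :: res) := by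
      simp only [bLoop]
      rw [hpop, hstack, hd]
    have harith : n - (k + 1) = n - (k + 1) := rfl
    rw [show row.length - (k + 1) = n - (k + 1) from rfl, hstep, ih (by omega)]
    have hlen : k < (specList row).length := by simp [specList]; omega
    rw [List.take_add_one, List.getElem?_eq_getElem hlen]
    have : (specList row)[k] = dfun (row.getD k 0) (row.drop (k + 1)) := by
      simp [specList]
    rw [this]; simp

theorem view_range_alt_eq_spec (row : List Int) : view_range_alt row = specList row := by
  have h := bLoop_eq row row.length (le_refl _) []
  rw [Nat.sub_self] at h
  unfold view_range_alt
  have hlen : (specList row).length = row.length := by simp [specList]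
  rw [List.take_of_length_le (le_of_eq hlen), List.append_nil] at h
  simpa [stairs] using h

theorem loopA_eq (row : List Int) (v : Int) :
    ∀ (t s : Nat), row.length - s = t → ∀ vis,
      viewLoopA row v (PySem.List.pyRange (s : Int) (row.length : Int) 1) vis
        = vis + dfun v (row.drop s) := by
  intro t
  induction t with
  | zero =>
    intro s hs vis
    have h1 : (row.length : Int) ≤ (s : Int) := by exact_mod_cast Nat.le_of_sub_eq_zero hs
    rw [PySem.List.pyRange_one_eq_nil h1, List.drop_eq_nil_of_le (by omega)]
    simp [viewLoopA, dfun]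
  | succ t ih =>
    intro s hs vis
    have hlt : s < row.length := by omega
    have h1 : (s : Int) < (row.length : Int) := by exact_mod_cast hlt
    rw [PySem.List.pyRange_one_cons h1]
    have hget : PySem.List.pyGetD row (s : Int) 0 = row[s] := by
      simp [PySem.List.pyGetD_natCast, List.getD_eq_getElem?_getD, List.getElem?_eq_getElem hlt]
    have hdrop : row.drop s = row[s] :: row.drop (s + 1) := List.drop_eq_getElem_cons hlt
    rw [hdrop]
    show (let vis' := vis + 1;
      if PySem.List.pyGetD row (s:Int) 0 ≥ v then vis'
      else viewLoopA row v (PySem.List.pyRange ((s:Int)+1) (row.length:Int) 1) vis')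
        = vis + dfun v (row[s] :: row.drop (s + 1))
    rw [hget]
    simp only [dfun]
    by_cases hcmp : v ≤ row[s]
    · simp [hcmp, ge_iff_le]
    · have hpush : ((s : Int) + 1) = ((s + 1 : Nat) : Int) := by push_cast; ring
      rw [if_neg (by omega : ¬ row[s] ≥ v), if_neg hcmp, hpush,
        ih (s + 1) (by omega) (vis + 1)]
      ring
theorem view_range_eq_spec (row : List Int) : view_range row = specList row := by
  unfold view_range specList
  rw [PySem.List.foldl_append_singleton_eq_map, List.nil_append,
    PySem.List.enumerate_eq_map_pyRange (d := 0)]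
  simp only [PySem.List.len_eq]
  rw [PySem.List.pyRange_zero_nat, List.map_map,
    List.map_map]
  apply List.map_congr_left
  intro k hk
  have hk' : k < row.length := List.mem_range.mp hk
  simp only [Function.comp]
  rw [show ((k : Int) + 1) = ((k + 1 : Nat) : Int) by push_cast; ring,
    loopA_eq row _ (row.length - (k+1)) (k+1) rfl 0]
  simp [PySem.List.pyGetD_natCast, List.getD_eq_getElem?_getD, List.getElem?_eq_getElem hk']

-- ===== VERDICT (by name: the statement is the Claim_ definition above) =====
theorem view_range_spec : Claim_equal_view_range := by
  intro row _
  show view_range row = view_range_alt row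
  rw [view_range_eq_spec, view_range_alt_eq_spec]
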